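-- pv_equiv track=rewrite | github.com/wjl57/SudokuSolver | SudokuPuzzle.py | get_naked_pair_vals_in_possibilities_dict
-- ===== SOURCE A (Python) =====
-- def get_naked_pair_vals_in_possibilities_dict(possibilities_dict):
--     """
--     :param possibilities_dict: A dictionary with key = offsets and value = the possibilities
--     :return: A list of (offset, vals) tuples corresponding to the offsets with matching possibilities
--     i.e. get_naked_pairs_in_possibilities({0: [4, 7], 1: [2, 3], 3: [2, 3],
--     6: [4, 7], 7: [], 8: [0, 7], 9: [2, 3]})
--     returns: [((0, 6), [4, 7]), ((1, 3), [2, 3]), ((1, 9), [2, 3]), ((3, 9), [2, 3])]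
--     """
--     l = len(possibilities_dict)
--     if l < 2:
--         return []
--     keys = list(possibilities_dict.keys())
--     naked_pairs_vals = []
--     for m in range(0, l):
--         vals = possibilities_dict[keys[m]]
--         for n in range(m+1, l):
--             if vals == possibilities_dict[keys[n]]:
--                 naked_pairs_vals.append(((keys[m], keys[n]), vals))
--     return naked_pairs_vals
-- ===== SOURCE B (Python) =====
-- def get_naked_pair_vals_in_possibilities_dict(possibilities_dict):
--     # Bucket the offsets by their possibility list; each offset then pairs
--     # exactly with the later members of its own bucket, which reproduces the
--     # nested-scan order of the result without comparing unrelated offsets.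
--     buckets = {}
--     for key, vals in possibilities_dict.items():
--         buckets.setdefault(tuple(vals), []).append(key)
--     seen = {}
--     result = []
--     for key, vals in possibilities_dict.items():
--         t = tuple(vals)
--         rank = seen.get(t, 0)
--         seen[t] = rank + 1
--         for other in buckets[t][rank + 1:]:
--             result.append(((key, other), vals))
--     return result
-- ===== Notes on version B (the rewrite author's own statement) =====
-- stated objective: alternative
-- what changed: Replaces A's all-pairs double scan with list comparisons by a group-by dictionary keyed by the possibility tuple: each offset pairs only with the later members of its own bucket (tracked by a rank counter), which reproduces A's scan order with no cross-bucket comparisons.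
import Mathlib
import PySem

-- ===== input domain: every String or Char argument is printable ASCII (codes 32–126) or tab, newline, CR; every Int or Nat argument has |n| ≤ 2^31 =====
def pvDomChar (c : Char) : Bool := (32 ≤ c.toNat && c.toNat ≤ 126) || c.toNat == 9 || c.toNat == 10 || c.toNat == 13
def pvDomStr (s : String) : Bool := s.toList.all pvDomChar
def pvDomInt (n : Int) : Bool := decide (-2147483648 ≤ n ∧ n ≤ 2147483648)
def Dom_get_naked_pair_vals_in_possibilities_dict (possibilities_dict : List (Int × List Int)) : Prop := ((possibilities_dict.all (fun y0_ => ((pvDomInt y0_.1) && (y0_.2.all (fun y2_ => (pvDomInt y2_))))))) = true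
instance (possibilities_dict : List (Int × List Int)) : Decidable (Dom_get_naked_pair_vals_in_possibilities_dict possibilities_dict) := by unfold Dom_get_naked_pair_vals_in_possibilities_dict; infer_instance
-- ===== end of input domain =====

-- B groups offsets by possibility list (a dict keyed by the value tuple) and pairs each offset
-- only with the later members of its own bucket, instead of A's all-pairs double loop;
-- equivalence of the two is proved below (objective: alternative).

-- ===== PORT A =====
def get_naked_pair_vals_in_possibilities_dict (possibilities_dict : List (Int × List Int)) : List ((Int × Int) × List Int) :=
  let d := PySem.Dict.ofList possibilities_dict
  let l : Int := (d.size : Int)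
  if l < 2 then [] else
  let keys := d.keys
  (PySem.List.pyRange 0 l).foldl (fun acc m =>
    let vals := d.getD (PySem.List.pyGetD keys m 0) []
    (PySem.List.pyRange (m + 1) l).foldl (fun acc2 n =>
      if vals == d.getD (PySem.List.pyGetD keys n 0) [] then
        acc2 ++ [((PySem.List.pyGetD keys m 0, PySem.List.pyGetD keys n 0), vals)]
      else acc2) acc) []

-- ===== PORT B =====
def get_naked_pair_vals_in_possibilities_dict_alt (possibilities_dict : List (Int × List Int)) : List ((Int × Int) × List Int) :=
  let d := PySem.Dict.ofList possibilities_dict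
  let buckets : PySem.Dict (List Int) (List Int) :=
    d.items.foldl (fun b p => b.modify p.2 [] (fun ks => ks ++ [p.1])) PySem.Dict.empty
  let st := d.items.foldl
    (fun (st : PySem.Dict (List Int) Int × List ((Int × Int) × List Int)) p =>
      let rank := st.1.getD p.2 0
      let seen := st.1.insert p.2 (rank + 1)
      (seen, st.2 ++ (PySem.List.slice (buckets.getD p.2 []) (some (rank + 1)) none).map
        (fun other => ((p.1, other), p.2))))
    (PySem.Dict.empty, [])
  st.2

-- ===== PRECONDITION & SPEC =====
def Spec_get_naked_pair_vals_in_possibilities_dict (possibilities_dict : List (Int × List Int)) (out : List ((Int × Int) × List Int)) : Prop := out = get_naked_pair_vals_in_possibilities_dict_alt possibilities_dict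
instance (possibilities_dict : List (Int × List Int)) (out : List ((Int × Int) × List Int)) : Decidable (Spec_get_naked_pair_vals_in_possibilities_dict possibilities_dict out) := by unfold Spec_get_naked_pair_vals_in_possibilities_dict; infer_instance

-- ===== CLAIM (what is proved, stated in full; the proofs are below) =====
def Claim_equal_get_naked_pair_vals_in_possibilities_dict : Prop := ∀ (possibilities_dict : List (Int × List Int)), Dom_get_naked_pair_vals_in_possibilities_dict possibilities_dict → Spec_get_naked_pair_vals_in_possibilities_dict possibilities_dict (get_naked_pair_vals_in_possibilities_dict possibilities_dict)

-- ===== LEMMAS AND PROOFS =====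

-- structural pairs helper and the canonical value both ports are reduced to
def pvPairs {α : Type} : List α → List (α × α)
  | [] => []
  | first :: rest => rest.map (fun other => (first, other)) ++ pvPairs rest

def pvSpecList (xs : List (Int × List Int)) : List ((Int × Int) × List Int) :=
  ((pvPairs xs).filter (fun q => q.1.2 == q.2.2)).map (fun q => ((q.1.1, q.2.1), q.1.2))

def pvSufRec {α β : Type} (g : α → List α → List β) : List α → List β
  | [] => []
  | y :: t => g y t ++ pvSufRec g t

def pvStep {α β : Type} (g : α → List α → List β) : List α → List β
  | [] => []
  | y :: t => g y t

lemma pvSpecList_cons (y : Int × List Int) (t : List (Int × List Int)) :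
    pvSpecList (y :: t)
      = (t.filter (fun z => y.2 == z.2)).map (fun z => ((y.1, z.1), y.2)) ++ pvSpecList t := by
  simp [pvSpecList, pvPairs, List.filter_append, List.filter_map, List.map_map, Function.comp_def]

lemma pvSpecList_eq_sufRec (xs : List (Int × List Int)) :
    pvSpecList xs
      = pvSufRec (fun y t => (t.filter (fun z => y.2 == z.2)).map (fun z => ((y.1, z.1), y.2))) xs := by
  induction xs with
  | nil => rfl
  | cons y t ih => rw [pvSpecList_cons, ih]; rfl

lemma pv_flatMap_range_drop {α β : Type} (g : α → List α → List β) (xs : List α) :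
    (List.range xs.length).flatMap (fun k => pvStep g (xs.drop k)) = pvSufRec g xs := by
  induction xs with
  | nil => rfl
  | cons y t ih =>
      rw [List.length_cons, List.range_succ_eq_map, List.flatMap_cons, List.flatMap_map]
      simp only [List.drop_zero, List.drop_succ_cons, Nat.succ_eq_add_one]
      rw [ih]
      rfl

lemma pv_getD_items {κ ν : Type} [BEq κ] [LawfulBEq κ] (d : PySem.Dict κ ν) (dflt : ν)
    (hnd : d.keys.Nodup) : ∀ y ∈ d.items, d.getD y.1 dflt = y.2 := by
  intro y hy
  rw [PySem.Dict.items_eq_map_keys d hnd dflt] at hy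
  obtain ⟨k, hk, rfl⟩ := List.mem_map.1 hy
  rfl

lemma pvA_eq_spec (pd : List (Int × List Int)) :
    get_naked_pair_vals_in_possibilities_dict pd = pvSpecList (PySem.Dict.ofList pd).items := by
  unfold get_naked_pair_vals_in_possibilities_dict
  set d := PySem.Dict.ofList pd with hd
  set xs := d.items with hxs
  have hnd : d.keys.Nodup := PySem.Dict.nodup_keys_ofList pd
  have hget : ∀ y ∈ xs, d.getD y.1 [] = y.2 := pv_getD_items d [] hnd
  have hkeys : d.keys = xs.map (fun y => y.1) := rfl
  have hsize : d.size = xs.length := rfl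
  by_cases hl : ((d.size : Int) < 2)
  · rw [if_pos hl]
    rw [hsize] at hl
    match xs, hl with
    | [], _ => rfl
    | [y], _ => simp [pvSpecList, pvPairs]
    | y :: z :: t, h => simp at h; omega
  · rw [if_neg hl]
    -- inner loop: rewrite per m ∈ pyRange 0 l
    rw [PySem.List.foldl_congr_mem _ _
      (fun acc m => acc ++
        (((xs.map (fun y => y.1)).drop (m + 1).toNat).filter
            (fun c => d.getD (PySem.List.pyGetD (xs.map (fun y => y.1)) m 0) [] == d.getD c [])).map
          (fun c => ((PySem.List.pyGetD (xs.map (fun y => y.1)) m 0, c),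
            d.getD (PySem.List.pyGetD (xs.map (fun y => y.1)) m 0) [])))
      []
      (by
        intro acc m hm
        rw [PySem.List.mem_pyRange_one] at hm
        have h0 : (0:Int) ≤ m + 1 := by omega
        have hlen : (d.size : Int) = ((xs.map (fun y => y.1)).length : Int) := by
          simp [hsize]
        rw [hkeys, hlen]
        rw [PySem.List.foldl_pyRange_pyGetD' (xs.map (fun y => y.1)) 0
          (fun acc2 c => if d.getD (PySem.List.pyGetD (xs.map (fun y => y.1)) m 0) [] == d.getD c [] then
            acc2 ++ [((PySem.List.pyGetD (xs.map (fun y => y.1)) m 0, c),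
              d.getD (PySem.List.pyGetD (xs.map (fun y => y.1)) m 0) [])] else acc2) acc h0]
        rw [PySem.List.foldl_append_if])]
    rw [PySem.List.foldl_append_eq_flatMap, List.nil_append]
    rw [hsize, PySem.List.pyRange_zero_natCast, List.flatMap_map]
    rw [List.flatMap_congr (g :=
      (fun k => pvStep (fun y t => (t.filter (fun z => y.2 == z.2)).map (fun z => ((y.1, z.1), y.2))) (xs.drop k)))
      (by
        intro k hk
        rw [List.mem_range] at hk
        have hk' : k < (xs.map (fun y => y.1)).length := by simpa using hk
        have hg : PySem.List.pyGetD (xs.map (fun y => y.1)) (k : Int) 0 = xs[k].1 := by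
          rw [PySem.List.pyGetD_eq_getElem _ 0 (by omega) (by exact_mod_cast hk')]
          simp
        have htn : ((k : Int) + 1).toNat = k + 1 := by omega
        rw [hg, htn]
        beta_reduce
        have hdropk : xs.drop k = xs[k] :: xs.drop (k + 1) := List.drop_eq_getElem_cons hk
        rw [hdropk]
        dsimp only [pvStep]
        have hdm : (xs.map (fun y => y.1)).drop (k+1) = (xs.drop (k+1)).map (fun y => y.1) := by
          simp [List.map_drop]
        rw [hdm, List.filter_map]
        rw [List.filter_congr (q := fun z => xs[k].2 == z.2) (by
          intro z hz
          have : d.getD z.1 [] = z.2 := hget z (List.mem_of_mem_drop hz)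
          simp [Function.comp, this, hget xs[k] (by simp)])]
        simp [List.map_map, Function.comp_def, hget xs[k] (by simp)])]
    rw [pv_flatMap_range_drop (fun y t => (t.filter (fun z => y.2 == z.2)).map (fun z => ((y.1, z.1), y.2))) xs, pvSpecList_eq_sufRec]

lemma pv_loop_inv (buckets : PySem.Dict (List Int) (List Int)) (xs : List (Int × List Int))
    (hb : ∀ t, buckets.getD t [] = (xs.filter (fun y => y.2 == t)).map (fun y => y.1)) :
    ∀ (suf pre : List (Int × List Int)), xs = pre ++ suf →
    ∀ (seen : PySem.Dict (List Int) Int) (acc : List ((Int × Int) × List Int)),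
    (∀ t, seen.getD t 0 = ((pre.filter (fun y => y.2 == t)).length : Int)) →
    (suf.foldl
      (fun (st : PySem.Dict (List Int) Int × List ((Int × Int) × List Int)) p =>
        let rank := st.1.getD p.2 0
        let seen := st.1.insert p.2 (rank + 1)
        (seen, st.2 ++ (PySem.List.slice (buckets.getD p.2 []) (some (rank + 1)) none).map
          (fun other => ((p.1, other), p.2))))
      (seen, acc)).2
      = acc ++ pvSufRec (fun y t => (t.filter (fun z => y.2 == z.2)).map (fun z => ((y.1, z.1), y.2))) suf := by
  intro suf
  induction suf with
  | nil => intro pre hxs seen acc hseen; simp [pvSufRec]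
  | cons y rest ih =>
      intro pre hxs seen acc hseen
      rw [List.foldl_cons]
      simp only []
      have hrank : seen.getD y.2 0 = ((pre.filter (fun z => z.2 == y.2)).length : Int) := hseen y.2
      -- the emitted chunk
      have hchunk : (PySem.List.slice (buckets.getD y.2 []) (some (seen.getD y.2 0 + 1)) none).map
            (fun other => ((y.1, other), y.2))
          = (rest.filter (fun z => y.2 == z.2)).map (fun z => ((y.1, z.1), y.2)) := by
        rw [hb y.2, hxs]
        rw [PySem.List.slice_from _ (by rw [hrank]; positivity)]
        have htn : (seen.getD y.2 0 + 1).toNat = (pre.filter (fun z => z.2 == y.2)).length + 1 := by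
          rw [hrank]; omega
        rw [htn]
        rw [List.filter_append, List.filter_cons]
        simp only [show (y.2 == y.2) = true by simp, if_pos]
        rw [List.map_append]
        rw [List.map_cons]
        rw [show List.map (fun z => z.1) (List.filter (fun z => z.2 == y.2) pre) ++
              (y.1 :: List.map (fun z => z.1) (List.filter (fun z => z.2 == y.2) rest))
            = (List.map (fun z => z.1) (List.filter (fun z => z.2 == y.2) pre) ++ [y.1]) ++
              List.map (fun z => z.1) (List.filter (fun z => z.2 == y.2) rest) by simp]
        rw [List.drop_left' (by simp)]
        rw [List.map_map]
        rw [List.filter_congr (q := fun z => y.2 == z.2)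
          (by
            intro z _
            by_cases hz : z.2 = y.2
            · simp [hz]
            · have h1 : (z.2 == y.2) = false := by simp [hz]
              have h2 : (y.2 == z.2) = false := by simp [Ne.symm hz]
              rw [h1]; exact h2.symm)]
        rfl
      have hseen' : ∀ t, (seen.insert y.2 (seen.getD y.2 0 + 1)).getD t 0
          = ((((pre ++ [y]).filter (fun z => z.2 == t)).length : Int)) := by
        intro t
        by_cases ht : t = y.2
        · subst ht
          rw [PySem.Dict.getD_insert_self, hrank]
          rw [List.filter_append, List.filter_cons]
          simp
        · rw [PySem.Dict.getD_insert_of_ne _ _ _ ht, hseen t]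
          have hy2 : (y.2 == t) = false := by simp [Ne.symm ht]
          rw [List.filter_append, List.filter_cons]
          simp [hy2]
      rw [ih (pre ++ [y]) (by rw [hxs]; simp) _ _ hseen']
      rw [hchunk]
      rw [show pvSufRec (fun y t => (t.filter (fun z => y.2 == z.2)).map
            (fun z => ((y.1, z.1), y.2))) (y :: rest)
          = (rest.filter (fun z => y.2 == z.2)).map (fun z => ((y.1, z.1), y.2))
            ++ pvSufRec (fun y t => (t.filter (fun z => y.2 == z.2)).map
                (fun z => ((y.1, z.1), y.2))) rest from rfl]
      rw [List.append_assoc]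

lemma pvB_eq_spec (pd : List (Int × List Int)) :
    get_naked_pair_vals_in_possibilities_dict_alt pd = pvSpecList (PySem.Dict.ofList pd).items := by
  show ((PySem.Dict.ofList pd).items.foldl
      (fun (st : PySem.Dict (List Int) Int × List ((Int × Int) × List Int)) p =>
        let rank := st.1.getD p.2 0
        let seen := st.1.insert p.2 (rank + 1)
        (seen, st.2 ++ (PySem.List.slice
            (((PySem.Dict.ofList pd).items.foldl
                (fun b p => b.modify p.2 [] (fun ks => ks ++ [p.1]))
                (PySem.Dict.empty : PySem.Dict (List Int) (List Int))).getD p.2 [])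
            (some (rank + 1)) none).map
          (fun other => ((p.1, other), p.2))))
      ((PySem.Dict.empty : PySem.Dict (List Int) Int), [])).2
    = pvSpecList (PySem.Dict.ofList pd).items
  set xs := (PySem.Dict.ofList pd).items with hxs
  set buckets := xs.foldl (fun b p => b.modify p.2 [] (fun ks => ks ++ [p.1]))
      (PySem.Dict.empty : PySem.Dict (List Int) (List Int)) with hbk
  have hb : ∀ t, buckets.getD t []
      = (xs.filter (fun y => y.2 == t)).map (fun y => y.1) := by
    intro t
    have hmm : buckets = (xs.map (fun p => (p.2, p.1))).foldl
        (fun b pr => b.modify pr.1 [] (fun ks => ks ++ [pr.2])) PySem.Dict.empty := by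
      rw [hbk, List.foldl_map]
    rw [hmm, PySem.Dict.getD_foldl_modify_append]
    simp [List.filter_map, List.map_map, Function.comp_def]
  rw [pv_loop_inv buckets xs hb xs [] rfl PySem.Dict.empty []
    (by intro t; simp)]
  rw [List.nil_append, ← pvSpecList_eq_sufRec]


-- ===== VERDICT (by name: the statement is the Claim_ definition above) =====
theorem get_naked_pair_vals_in_possibilities_dict_spec : Claim_equal_get_naked_pair_vals_in_possibilities_dict := by
  intro pd _
  unfold Spec_get_naked_pair_vals_in_possibilities_dict
  rw [pvA_eq_spec, pvB_eq_spec]
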